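-- pv_equiv track=rewrite | github.com/SampathEmandi/nuc_python_load_test | encryption.py | _demorph_string
-- ===== SOURCE A (Python) =====
-- MORPH_RULES = {
--     "R": "Ef4YsO2cbQZ2",
--     "W": "U4Bai5Qn1ZCp",
--     "q": "zR2H8Cd5maEc",
--     "a": "yUz4P1a7Dz6v",
--     "E": "Xm5VaT2B7c9a",
-- }
--
-- def _demorph_string(input_string: str) -> str:
--     """
--     Reverse the morphing process by replacing morphed substrings back to original characters.
--
--     Args:
--         input_string: The morphed string to demorph
--
--     Returns:
--         The demorphed string
--     """
--     # Create reverse mapping from morphed values to original keys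
--     demorph_map = {value: key for key, value in MORPH_RULES.items()}
--
--     output = ""
--     i = 0
--     while i < len(input_string):
--         match_found = False
--         # Check each morphed value to see if it matches at current position
--         for morphed_value, original_char in demorph_map.items():
--             if input_string[i:i+len(morphed_value)] == morphed_value:
--                 output += original_char
--                 i += len(morphed_value)
--                 match_found = True
--                 break
--         if not match_found:
--             output += input_string[i]
--             i += 1
--     return output
-- ===== SOURCE B (Python) =====
-- MORPH_RULES = {
--     "R": "Ef4YsO2cbQZ2",
--     "W": "U4Bai5Qn1ZCp",
--     "q": "zR2H8Cd5maEc",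
--     "a": "yUz4P1a7Dz6v",
--     "E": "Xm5VaT2B7c9a",
-- }
--
-- def _demorph_string(input_string: str) -> str:
--     # Jump scan: instead of testing every position character by character,
--     # locate the earliest next occurrence of any morphed value with str.find,
--     # copy the whole untouched block in one slice, emit the original character,
--     # and continue after the 12-char match.  Correct because the five morphed
--     # values start with five distinct characters, so occurrences never tie at a
--     # position, and the earliest occurrence is exactly the one the leftmost
--     # scan would consume.
--     demorph = {value: key for key, value in MORPH_RULES.items()}
--     out = []
--     i = 0
--     while True:
--         best = None  # (position, original char) of the earliest occurrence
--         for value, key in demorph.items():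
--             j = input_string.find(value, i)
--             if j != -1 and (best is None or j < best[0]):
--                 best = (j, key)
--         if best is None:
--             out.append(input_string[i:])
--             return "".join(out)
--         j, key = best
--         out.append(input_string[i:j])
--         out.append(key)
--         i = j + 12
-- ===== Notes on version B (the rewrite author's own statement) =====
-- stated objective: faster
-- what changed: Replaces A's per-position while-loop that tests every pattern at each index (with match_found flag and string concatenation) by str.find-based jumps: locate the earliest next occurrence among the five morphed values, copy the whole untouched block with one slice, and continue after the match; correct because the patterns' distinct first characters make occurrences never tie and the earliest occurrence is exactly what the leftmost scan consumes.
import Mathlib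
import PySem

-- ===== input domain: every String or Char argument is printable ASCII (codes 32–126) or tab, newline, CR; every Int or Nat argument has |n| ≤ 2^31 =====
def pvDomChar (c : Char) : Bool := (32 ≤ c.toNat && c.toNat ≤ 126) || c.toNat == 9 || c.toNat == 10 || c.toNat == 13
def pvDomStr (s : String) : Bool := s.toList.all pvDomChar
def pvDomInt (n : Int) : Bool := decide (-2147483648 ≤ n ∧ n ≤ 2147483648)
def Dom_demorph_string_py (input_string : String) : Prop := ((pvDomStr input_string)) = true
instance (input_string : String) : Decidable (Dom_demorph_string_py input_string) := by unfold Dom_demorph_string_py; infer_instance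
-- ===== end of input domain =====

-- B replaces A's per-position scan over all five patterns by str.find-based jumps to the
-- earliest next occurrence, copying untouched blocks wholesale (objective: faster, constant factor).

-- ===== PORT A =====
-- MORPH_RULES, then demorph_map = {value: key for key, value in MORPH_RULES.items()},
-- as association lists of char lists (string keys/values represented by their character lists).
def pvDemorphItems : List (List Char × List Char) :=
  [("Ef4YsO2cbQZ2".toList, "R".toList),
   ("U4Bai5Qn1ZCp".toList, "W".toList),
   ("zR2H8Cd5maEc".toList, "q".toList),
   ("yUz4P1a7Dz6v".toList, "a".toList),
   ("Xm5VaT2B7c9a".toList, "E".toList)]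

-- the inner 'for morphed_value, original_char in demorph_map.items(): … break' loop:
-- first item whose value matches at the current position (s[i:i+len(v)] == v), with its length
def pvAScan : List (List Char × List Char) → List Char → Option (List Char × Nat)
  | [], _ => none
  | (v, k) :: rest, cs => if v.isPrefixOf cs then some (k, v.length) else pvAScan rest cs

theorem pvAScan_items_len {cs : List Char} {k : List Char} {len : Nat}
    (h : pvAScan pvDemorphItems cs = some (k, len)) : len = 12 := by
  simp only [pvDemorphItems, pvAScan] at h
  split_ifs at h <;> simp_all

-- the 'while i < len(input_string)' loop, output accumulated left to right
def pvALoop (output : List Char) (cs : List Char) : List Char :=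
  match cs with
  | [] => output
  | c :: rest =>
    match h : pvAScan pvDemorphItems (c :: rest) with
    | some (k, len) => pvALoop (output ++ k) ((c :: rest).drop len)
    | none => pvALoop (output ++ [c]) rest
termination_by cs.length
decreasing_by
  · have h12 := pvAScan_items_len h; simp [h12]
  · simp

def demorph_string_py (input_string : String) : String :=
  String.ofList (pvALoop [] input_string.toList)

-- ===== PORT B =====
-- demorph = {value: key for key, value in MORPH_RULES.items()} as an association list
def pvDemorphDict : List (List Char × List Char) :=
  [("Ef4YsO2cbQZ2".toList, "R".toList),
   ("U4Bai5Qn1ZCp".toList, "W".toList),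
   ("zR2H8Cd5maEc".toList, "q".toList),
   ("yUz4P1a7Dz6v".toList, "a".toList),
   ("Xm5VaT2B7c9a".toList, "E".toList)]

-- the 'for value, key in demorph.items()' loop selecting the earliest occurrence:
-- j = input_string.find(value, i); keep (j, key) if j != -1 and earlier than the best so far
def pvBBest (cs : List Char) (i : Nat) : List (List Char × List Char) →
    Option (Int × List Char) → Option (Int × List Char)
  | [], best => best
  | (v, k) :: rest, best =>
    let j := PySem.Chars.findFrom cs v (i : Int) none
    let best' :=
      if j = -1 then best
      else
        match best with
        | none => some (j, k)
        | some b => if j < b.1 then some (j, k) else best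
    pvBBest cs i rest best'

-- the 'while True' loop: out = collected pieces, i = current position; the fuel argument
-- only makes the recursion structural (each match advances i by 12, so it never runs out)
def pvBMain (fuel : Nat) (cs : List Char) (out : List (List Char)) (i : Nat) : List Char :=
  match fuel with
  | 0 => (out ++ [PySem.List.slice cs (some (i : Int)) none]).flatten
  | fuel + 1 =>
    match pvBBest cs i pvDemorphDict none with
    | none => (out ++ [PySem.List.slice cs (some (i : Int)) none]).flatten
    | some (j, k) =>
        pvBMain fuel cs (out ++ [PySem.List.slice cs (some (i : Int)) (some j), k]) (j.toNat + 12)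

def demorph_string_py_alt (input_string : String) : String :=
  String.ofList (pvBMain (input_string.toList.length + 13) input_string.toList [] 0)

-- ===== PRECONDITION & SPEC =====
def Spec_demorph_string_py (input_string : String) (out : String) : Prop := out = demorph_string_py_alt input_string
instance (input_string : String) (out : String) : Decidable (Spec_demorph_string_py input_string out) := by unfold Spec_demorph_string_py; infer_instance

-- ===== CLAIM (what is proved, stated in full; the proofs are below) =====
def Claim_equal_demorph_string_py : Prop := ∀ (input_string : String), Dom_demorph_string_py input_string → Spec_demorph_string_py input_string (demorph_string_py input_string)

-- ===== LEMMAS AND PROOFS =====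

-- A's scan only succeeds when some pattern is a prefix
theorem pvAScan_some_mem {l : List (List Char × List Char)} {s k : List Char} {n : Nat}
    (h : pvAScan l s = some (k, n)) : ∃ v, (v, k) ∈ l ∧ v <+: s := by
  induction l with
  | nil => simp [pvAScan] at h
  | cons p rest ih =>
    obtain ⟨v, k'⟩ := p
    simp only [pvAScan] at h
    split_ifs at h with hpre
    · obtain ⟨rfl, rfl⟩ : k' = k ∧ v.length = n := by simpa using h
      exact ⟨v, by simp, List.isPrefixOf_iff_prefix.mp hpre⟩
    · obtain ⟨w, hw, hp⟩ := ih h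
      exact ⟨w, List.mem_cons_of_mem _ hw, hp⟩

-- If no pattern occurs anywhere in s, A copies s unchanged
theorem pvALoop_no_match (s : List Char)
    (H : ∀ v k, (v, k) ∈ pvDemorphItems → ¬ v <:+: s) :
    ∀ acc, pvALoop acc s = acc ++ s := by
  induction s with
  | nil => intro acc; rw [pvALoop]; simp
  | cons c rest ih =>
    intro acc
    have hscan : pvAScan pvDemorphItems (c :: rest) = none := by
      cases hs : pvAScan pvDemorphItems (c :: rest) with
      | none => rfl
      | some p =>
        obtain ⟨k, n⟩ := p
        obtain ⟨v, hv, hp⟩ := pvAScan_some_mem hs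
        exact absurd hp.isInfix (H v k hv)
    rw [pvALoop]
    split
    · rename_i k len heq
      rw [hscan] at heq
      cases heq
    · rw [ih (fun v k hv hinf => H v k hv (hinf.trans (List.suffix_cons c rest).isInfix)) (acc ++ [c])]
      simp

-- If the scan fails at every position below m, A copies the first m characters
theorem pvALoop_copy (m : Nat) : ∀ (s : List Char) (acc : List Char),
    (∀ p < m, pvAScan pvDemorphItems (s.drop p) = none) →
    pvALoop acc s = pvALoop (acc ++ s.take m) (s.drop m) := by
  induction m with
  | zero => intro s acc _; simp
  | succ m ih =>
    intro s acc H
    cases s with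
    | nil => rw [List.take_nil, List.drop_nil, List.append_nil]
    | cons c rest =>
      have h0 : pvAScan pvDemorphItems (c :: rest) = none := by simpa using H 0 (by omega)
      rw [pvALoop]
      split
      · rename_i k len heq
        rw [h0] at heq
        cases heq
      · rw [ih rest (acc ++ [c]) (fun p hp => by simpa using H (p + 1) (by omega))]
        simp

-- two distinct nonempty prefixes with different heads cannot both be prefixes
theorem pv_prefix_head {p s : List Char} (hp : p ≠ []) (h : p <+: s) :
    s.head? = p.head? := by
  obtain ⟨t, rfl⟩ := h
  cases p with
  | nil => exact absurd rfl hp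
  | cons a q => rfl

-- At a position where pattern v (an entry of the table) is a prefix, A's scan returns its key
theorem pv_head_ne {p q s : List Char} (hp : p ≠ []) (hq : q ≠ []) (hpq : p.head? ≠ q.head?)
    (h : q <+: s) : ¬ p <+: s := by
  intro hc
  exact hpq (by rw [← pv_prefix_head hp hc, ← pv_prefix_head hq h])

-- At a position where pattern v (an entry of the table) is a prefix, A's scan returns its key
theorem pvAScan_at_match {v k s : List Char}
    (hv : (v, k) ∈ pvDemorphItems) (hp : v <+: s) :
    pvAScan pvDemorphItems s = some (k, 12) := by
  simp only [pvDemorphItems, List.mem_cons, List.not_mem_nil, or_false, Prod.mk.injEq] at hv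
  rcases hv with ⟨rfl, rfl⟩ | ⟨rfl, rfl⟩ | ⟨rfl, rfl⟩ | ⟨rfl, rfl⟩ | ⟨rfl, rfl⟩
  · simp_all [pvAScan, pvDemorphItems]
  · have e1 := pv_head_ne (p := "Ef4YsO2cbQZ2".toList) (by decide) (by decide) (by decide) hp
    simp_all [pvAScan, pvDemorphItems]
  · have e1 := pv_head_ne (p := "Ef4YsO2cbQZ2".toList) (by decide) (by decide) (by decide) hp
    have e2 := pv_head_ne (p := "U4Bai5Qn1ZCp".toList) (by decide) (by decide) (by decide) hp
    simp_all [pvAScan, pvDemorphItems]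
  · have e1 := pv_head_ne (p := "Ef4YsO2cbQZ2".toList) (by decide) (by decide) (by decide) hp
    have e2 := pv_head_ne (p := "U4Bai5Qn1ZCp".toList) (by decide) (by decide) (by decide) hp
    have e3 := pv_head_ne (p := "zR2H8Cd5maEc".toList) (by decide) (by decide) (by decide) hp
    simp_all [pvAScan, pvDemorphItems]
  · have e1 := pv_head_ne (p := "Ef4YsO2cbQZ2".toList) (by decide) (by decide) (by decide) hp
    have e2 := pv_head_ne (p := "U4Bai5Qn1ZCp".toList) (by decide) (by decide) (by decide) hp
    have e3 := pv_head_ne (p := "zR2H8Cd5maEc".toList) (by decide) (by decide) (by decide) hp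
    have e4 := pv_head_ne (p := "yUz4P1a7Dz6v".toList) (by decide) (by decide) (by decide) hp
    simp_all [pvAScan, pvDemorphItems]

-- characterisation of pvBBest returning none
theorem pvBBest_none {cs : List Char} {i : Nat} :
    ∀ (l : List (List Char × List Char)) (best : Option (Int × List Char)),
      pvBBest cs i l best = none →
      best = none ∧ ∀ p ∈ l, PySem.Chars.findFrom cs p.1 (i : Int) none = -1 := by
  intro l
  induction l with
  | nil => intro best h; simpa [pvBBest] using h
  | cons q rest ih =>
    intro best h
    obtain ⟨v, k⟩ := q
    simp only [pvBBest] at h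
    obtain ⟨hb', hrest⟩ := ih _ h
    by_cases hj : PySem.Chars.findFrom cs v (i : Int) none = -1
    · simp only [hj] at hb'
      refine ⟨hb', fun p hp => ?_⟩
      rcases List.mem_cons.mp hp with rfl | hp
      · exact hj
      · exact hrest p hp
    · exfalso
      simp only [if_neg hj] at hb'
      cases best with
      | none => simp at hb'
      | some b => by_cases hlt : PySem.Chars.findFrom cs v (i : Int) none < b.1 <;> simp [hlt] at hb'

-- characterisation of pvBBest returning some: a real find hit, minimal among all hits
theorem pvBBest_some {cs : List Char} {i : Nat} :
    ∀ (l : List (List Char × List Char)) (best : Option (Int × List Char)) (j : Int) (k : List Char),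
      pvBBest cs i l best = some (j, k) →
      ((∃ v, (v, k) ∈ l ∧ PySem.Chars.findFrom cs v (i : Int) none = j ∧ j ≠ -1) ∨ best = some (j, k))
      ∧ (∀ p ∈ l, PySem.Chars.findFrom cs p.1 (i : Int) none = -1 ∨ j ≤ PySem.Chars.findFrom cs p.1 (i : Int) none)
      ∧ (∀ b, best = some b → j ≤ b.1) := by
  intro l
  induction l with
  | nil =>
    intro best j k h
    simp only [pvBBest] at h
    exact ⟨Or.inr h, by simp, fun b hb => by rw [h] at hb; cases hb; exact le_refl _⟩
  | cons q rest ih =>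
    intro best j k h
    obtain ⟨v, k'⟩ := q
    by_cases hneg : PySem.Chars.findFrom cs v (i : Int) none = -1
    · -- this pattern has no occurrence: the accumulator is passed through
      simp only [pvBBest, hneg, if_pos] at h
      obtain ⟨i1, i2, i3⟩ := ih best j k h
      refine ⟨?_, ?_, i3⟩
      · rcases i1 with ⟨w, hw, hfw, hne⟩ | hb
        · exact Or.inl ⟨w, List.mem_cons_of_mem _ hw, hfw, hne⟩
        · exact Or.inr hb
      · intro p hp
        rcases List.mem_cons.mp hp with rfl | hp
        · exact Or.inl hneg
        · exact i2 p hp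
    · cases best with
      | none =>
        simp only [pvBBest, hneg, if_false] at h
        obtain ⟨i1, i2, i3⟩ := ih (some (PySem.Chars.findFrom cs v (i : Int) none, k')) j k h
        have hjle : j ≤ PySem.Chars.findFrom cs v (i : Int) none :=
          i3 (PySem.Chars.findFrom cs v (i : Int) none, k') rfl
        refine ⟨?_, ?_, fun b hb => by cases hb⟩
        · rcases i1 with ⟨w, hw, hfw, hne⟩ | hb
          · exact Or.inl ⟨w, List.mem_cons_of_mem _ hw, hfw, hne⟩
          · obtain ⟨hj, hk⟩ : PySem.Chars.findFrom cs v (i : Int) none = j ∧ k' = k := by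
              simpa using hb
            exact Or.inl ⟨v, hk ▸ List.mem_cons_self .., hj, by omega⟩
        · intro p hp
          rcases List.mem_cons.mp hp with rfl | hp
          · exact Or.inr hjle
          · exact i2 p hp
      | some b0 =>
        by_cases hlt : PySem.Chars.findFrom cs v (i : Int) none < b0.1
        · simp only [pvBBest, hneg, hlt, if_pos, ite_false] at h
          obtain ⟨i1, i2, i3⟩ := ih (some (PySem.Chars.findFrom cs v (i : Int) none, k')) j k h
          have hjle : j ≤ PySem.Chars.findFrom cs v (i : Int) none :=
            i3 (PySem.Chars.findFrom cs v (i : Int) none, k') rfl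
          refine ⟨?_, ?_, ?_⟩
          · rcases i1 with ⟨w, hw, hfw, hne⟩ | hb
            · exact Or.inl ⟨w, List.mem_cons_of_mem _ hw, hfw, hne⟩
            · obtain ⟨hj, hk⟩ : PySem.Chars.findFrom cs v (i : Int) none = j ∧ k' = k := by
                simpa using hb
              exact Or.inl ⟨v, hk ▸ List.mem_cons_self .., hj, by omega⟩
          · intro p hp
            rcases List.mem_cons.mp hp with rfl | hp
            · exact Or.inr hjle
            · exact i2 p hp
          · intro b hb
            cases hb
            omega
        · simp only [pvBBest, hneg, hlt, ite_false] at h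
          obtain ⟨i1, i2, i3⟩ := ih (some b0) j k h
          have hjb0 : j ≤ b0.1 := i3 b0 rfl
          refine ⟨?_, ?_, ?_⟩
          · rcases i1 with ⟨w, hw, hfw, hne⟩ | hb
            · exact Or.inl ⟨w, List.mem_cons_of_mem _ hw, hfw, hne⟩
            · exact Or.inr hb
          · intro p hp
            rcases List.mem_cons.mp hp with rfl | hp
            · refine Or.inr ?_
              show j ≤ PySem.Chars.findFrom cs v (i : Int) none
              omega
            · exact i2 p hp
          · intro b hb
            cases hb
            exact hjb0

-- a pattern that is a prefix of a later suffix is an infix of an earlier one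
theorem pv_prefix_drop_infix {v cs : List Char} {i p : Nat} (hip : i ≤ p)
    (h : v <+: cs.drop p) : v <:+: cs.drop i := by
  have hd : cs.drop p = (cs.drop i).drop (p - i) := by
    rw [List.drop_drop]
    congr 1
    omega
  rw [hd] at h
  exact h.isInfix.trans (List.drop_suffix _ _).isInfix

-- the main bridge: B's jump loop produces exactly A's per-position scan output
theorem pv_bridge (cs : List Char) : ∀ (fuel i : Nat) (out : List (List Char)),
    i ≤ cs.length → cs.length + 1 - i ≤ fuel →
    pvBMain fuel cs out i = pvALoop out.flatten (cs.drop i) := by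
  intro fuel
  induction fuel with
  | zero => intro i out hi hf; omega
  | succ fuel ih =>
    intro i out hi _
    rw [pvBMain]
    cases hbest : pvBBest cs i pvDemorphDict none with
    | none =>
      split
      case h_2 heq => cases heq
      obtain ⟨-, hall⟩ := pvBBest_none _ _ hbest
      have hnone : ∀ v k, (v, k) ∈ pvDemorphItems → ¬ v <:+: cs.drop i := by
        intro v k hv
        have hv' : (v, k) ∈ pvDemorphDict := hv
        have := hall (v, k) hv'
        exact (PySem.Chars.findFrom_natCast_eq_neg_one_iff cs v i hi).mp this
      rw [pvALoop_no_match _ hnone]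
      rw [PySem.List.slice_from_natCast]
      simp
    | some jk =>
      obtain ⟨j, k⟩ := jk
      split
      case h_1 heq => cases heq
      case h_2 j' k' heq =>
      cases heq
      obtain ⟨hmem, hmin, -⟩ := pvBBest_some _ _ _ _ hbest
      rcases hmem with ⟨v, hv, hfv, hne⟩ | hb
      swap
      · cases hb
      have hspec := PySem.Chars.findFrom_natCast_spec cs v i hi (by rw [hfv]; exact hne)
      rw [hfv] at hspec
      obtain ⟨hij, hpre, hminv⟩ := hspec
      have hj0 : 0 ≤ j := le_trans (by positivity) hij
      have hvlen : v.length = 12 := by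
        have h12 : ∀ p ∈ pvDemorphItems, p.1.length = 12 := by decide
        exact h12 (v, k) hv
      have hjlen : j.toNat + 12 ≤ cs.length := by
        have := hpre.length_le
        rw [hvlen, List.length_drop] at this
        omega
      have hijn : i ≤ j.toNat := by omega
      -- every position in [i, j.toNat) matches no pattern
      have hnomatch : ∀ p, i ≤ p → p < j.toNat → pvAScan pvDemorphItems (cs.drop p) = none := by
        intro p hip hpj
        cases hs : pvAScan pvDemorphItems (cs.drop p) with
        | none => rfl
        | some pr =>
          exfalso
          obtain ⟨k', n⟩ := pr
          obtain ⟨w, hw, hwp⟩ := pvAScan_some_mem hs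
          have hw' : (w, k') ∈ pvDemorphDict := hw
          rcases hmin (w, k') hw' with hneg | hle
          · exact (PySem.Chars.findFrom_natCast_eq_neg_one_iff cs w i hi).mp hneg
              (pv_prefix_drop_infix hip hwp)
          · have hle' : j ≤ PySem.Chars.findFrom cs w (i : Int) none := hle
            have hne' : PySem.Chars.findFrom cs w (i : Int) none ≠ -1 := by omega
            obtain ⟨-, -, hminw⟩ := PySem.Chars.findFrom_natCast_spec cs w i hi hne'
            exact hminw p hip (by omega) hwp
      -- A copies up to j, then matches (v, k) there
      have hcopy := pvALoop_copy (j.toNat - i) (cs.drop i) out.flatten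
        (fun p hp => by
          rw [List.drop_drop]
          exact hnomatch (i + p) (by omega) (by omega))
      rw [hcopy]
      have harg1 : (cs.drop i).drop (j.toNat - i) = cs.drop j.toNat := by
        rw [List.drop_drop]; congr 1; omega
      rw [harg1]
      have hscanj := pvAScan_at_match hv hpre
      cases hcs : cs.drop j.toNat with
      | nil =>
        exfalso
        have : cs.length - j.toNat = 0 := by rw [← List.length_drop, hcs]; rfl
        omega
      | cons c rest =>
        rw [hcs] at hscanj
        rw [pvALoop]
        split
        · rename_i k' len' heq
          rw [hscanj] at heq
          have hkl : k' = k ∧ len' = 12 := by simpa using heq.symm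
          rw [hkl.1, hkl.2]
          have harg2 : (c :: rest).drop 12 = cs.drop (j.toNat + 12) := by
            rw [← hcs, List.drop_drop, Nat.add_comm]
          rw [harg2]
          rw [ih (j.toNat + 12) (out ++ [PySem.List.slice cs (some (i : Int)) (some j), k])
            hjlen (by omega)]
          congr 1
          have hjc : (j : Int) = ((j.toNat : Nat) : Int) := by omega
          rw [hjc, PySem.List.slice_natCast]
          simp
          omega
        · rename_i heq
          rw [hscanj] at heq
          cases heq

-- ===== VERDICT (by name: the statement is the Claim_ definition above) =====
theorem demorph_string_py_spec : Claim_equal_demorph_string_py := by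
  intro s _
  unfold Spec_demorph_string_py demorph_string_py demorph_string_py_alt
  rw [pv_bridge s.toList (s.toList.length + 13) 0 [] (by omega) (by omega)]
  rfl
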